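-- pv_equiv track=rewrite | github.com/agespino/miniproject3 | generate_spencer.py | parse_observations
-- ===== SOURCE A (Python) =====
-- def parse_observations(text):
--     # Convert text to dataset.
--     lines = [line.split() for line in text.split('\n') if line.split()]
--
--     obs_counter = 0
--     obs = []
--     obs_map = {}
--
--     for line in lines:
--         obs_elem = []
--         if len(line) == 2:
--             continue
--         for word in line:
--             word = ''.join([char for char in word if char in "abcdefghijklmnopqrstuvwxyzABCDEFGHIJKLMNOPQRSTUVWXYZ\'-"]).lower()
--             if word not in obs_map:
--                 # Add unique words to the observations map.
--                 obs_map[word] = obs_counter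
--                 obs_counter += 1
--
--             # Add the encoded word.
--             obs_elem.append(obs_map[word])
--
--         # Add the encoded sequence.
--         obs.append(obs_elem)
--
--     return obs, obs_map
-- ===== SOURCE B (Python) =====
-- def parse_observations(text):
--     allowed = "abcdefghijklmnopqrstuvwxyzABCDEFGHIJKLMNOPQRSTUVWXYZ'-"
--     cleaned = [
--         [''.join(c for c in w if c in allowed).lower() for w in ws]
--         for ws in (line.split() for line in text.split('\n'))
--         if ws and len(ws) != 2
--     ]
--     stream = [w for line in cleaned for w in line]
--     # first-occurrence index of every word: scan the stream BACKWARDS, overwriting,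
--     # so the value left for each word is its earliest position
--     first = {}
--     for i, w in reversed(list(enumerate(stream))):
--         first[w] = i
--     # word id = rank of the word when distinct words are sorted by first occurrence
--     obs_map = {}
--     for k, (w, _pos) in enumerate(sorted(first.items(), key=lambda p: p[1])):
--         obs_map[w] = k
--     obs = [[obs_map[w] for w in line] for line in cleaned]
--     return obs, obs_map
-- ===== Notes on version B (the rewrite author's own statement) =====
-- stated objective: alternative
-- what changed: A interleaves map building and encoding in one pass with an incrementing counter dict; B instead computes each word's first-occurrence position by a backward overwrite scan of the flattened token stream, assigns word ids as ranks from sorting the distinct words by that position, and then encodes every line through the finished map.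
import Mathlib
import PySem

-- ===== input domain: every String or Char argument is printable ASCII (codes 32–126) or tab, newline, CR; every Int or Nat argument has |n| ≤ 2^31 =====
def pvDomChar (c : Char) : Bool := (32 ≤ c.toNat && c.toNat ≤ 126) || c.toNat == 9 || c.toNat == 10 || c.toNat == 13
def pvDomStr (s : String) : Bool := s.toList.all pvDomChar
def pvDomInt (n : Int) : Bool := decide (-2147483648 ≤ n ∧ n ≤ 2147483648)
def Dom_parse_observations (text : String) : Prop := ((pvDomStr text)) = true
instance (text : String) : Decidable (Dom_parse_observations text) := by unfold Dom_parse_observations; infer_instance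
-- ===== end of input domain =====

-- B replaces A's incremental counter dict with a different algorithm: a backward overwrite scan
-- computes each word's first-occurrence position, and word ids are the ranks obtained by sorting
-- the distinct words by that position; objective: alternative.

-- ===== PORT A =====
def pvAllowed : List Char := "abcdefghijklmnopqrstuvwxyzABCDEFGHIJKLMNOPQRSTUVWXYZ'-".toList

-- ''.join(char for char in word if char in "…").lower()
def pvClean (w : String) : String :=
  PySem.Str.lower (String.ofList (w.toList.filter (fun c => pvAllowed.contains c)))

-- body of A's inner 'for word in line' loop; state = (obs_elem, obs_counter, obs_map)
def pvStepWordA (s : List Int × Int × PySem.Dict String Int) (word : String) :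
    List Int × Int × PySem.Dict String Int :=
  let w := pvClean word
  let mc := if s.2.2.contains w then (s.2.2, s.2.1) else (s.2.2.insert w s.2.1, s.2.1 + 1)
  (s.1 ++ [mc.1.getD w 0], mc.2, mc.1)

-- body of A's outer 'for line in lines' loop; state = (obs_counter, obs, obs_map)
def pvStepLineA (st : Int × List (List Int) × PySem.Dict String Int) (line : List String) :
    Int × List (List Int) × PySem.Dict String Int :=
  if line.length = 2 then st
  else
    let r := line.foldl pvStepWordA ([], st.1, st.2.2)
    (r.2.1, st.2.1 ++ [r.1], r.2.2)

def parse_observations (text : String) : List (List Int) × (List (String × Int)) :=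
  let lines := (((PySem.Str.split? text "\n").getD []).map PySem.Str.split₀).filter (fun l => !l.isEmpty)
  let r := lines.foldl pvStepLineA (0, [], PySem.Dict.empty)
  (r.2.1, r.2.2.items)

-- ===== PORT B =====
-- the cleaned kept lines (phase 1 of Source B)
def pvKept (text : String) : List (List String) :=
  ((((PySem.Str.split? text "\n").getD []).map PySem.Str.split₀).filter
      (fun ws => !ws.isEmpty && ws.length != 2)).map (fun ws => ws.map pvClean)

def parse_observations_alt (text : String) : List (List Int) × (List (String × Int)) :=
  let cleaned := pvKept text
  let stream := cleaned.flatten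
  -- for i, w in reversed(list(enumerate(stream))): first[w] = i
  let first := ((PySem.List.enumerate stream 0).reverse).foldl
      (fun d p => d.insert p.2 p.1) (PySem.Dict.empty : PySem.Dict String Int)
  -- for k, (w, _pos) in enumerate(sorted(first.items(), key=lambda p: p[1])): obs_map[w] = k
  let obs_map := (PySem.List.enumerate (PySem.List.sorted first.items (fun p => p.2)) 0).foldl
      (fun d q => d.insert q.2.1 q.1) (PySem.Dict.empty : PySem.Dict String Int)
  (cleaned.map (fun line => line.map (fun w => obs_map.getD w 0)), obs_map.items)

-- ===== PRECONDITION & SPEC =====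
def Spec_parse_observations (text : String) (out : List (List Int) × (List (String × Int))) : Prop := out = parse_observations_alt text
instance (text : String) (out : List (List Int) × (List (String × Int))) : Decidable (Spec_parse_observations text out) := by unfold Spec_parse_observations; infer_instance

-- ===== CLAIM (what is proved, stated in full; the proofs are below) =====
def Claim_equal_parse_observations : Prop := ∀ (text : String), Dom_parse_observations text → Spec_parse_observations text (parse_observations text)

-- ===== LEMMAS AND PROOFS =====

-- A's map-building step on an already-cleaned word, without the obs_elem component folded in
def pvIns (m : PySem.Dict String Int) (w : String) : PySem.Dict String Int :=
  if m.contains w then m else m.insert w (m.size : Int)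

-- A's word step on an already-cleaned word
def pvStepW (s : List Int × Int × PySem.Dict String Int) (w : String) :
    List Int × Int × PySem.Dict String Int :=
  let mc := if s.2.2.contains w then (s.2.2, s.2.1) else (s.2.2.insert w s.2.1, s.2.1 + 1)
  (s.1 ++ [mc.1.getD w 0], mc.2, mc.1)

-- the first-occurrence words of a list, skipping those already in ks (in order)
def pvNw (ks : List String) : List String → List String
  | [] => []
  | w :: t => if w ∈ ks then pvNw ks t else w :: pvNw (ks ++ [w]) t

-- the first-occurrence (word, position) pairs, positions counted from i
def pvFo (ks : List String) (i : Int) : List String → List (String × Int)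
  | [] => []
  | w :: t => if w ∈ ks then pvFo ks (i + 1) t else (w, i) :: pvFo (ks ++ [w]) (i + 1) t

theorem get?_pvIns_of_contains (m : PySem.Dict String Int) (w x : String)
    (h : m.contains x = true) : (pvIns m w).get? x = m.get? x := by
  unfold pvIns
  split_ifs with hc
  · rfl
  · apply PySem.Dict.get?_insert_of_ne
    intro hxw; rw [hxw] at h; simp [h] at hc

theorem contains_pvIns_of_contains (m : PySem.Dict String Int) (w x : String)
    (h : m.contains x = true) : (pvIns m w).contains x = true := by
  unfold pvIns
  split_ifs with hc
  · exact h
  · simp [PySem.Dict.contains_insert, h]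

theorem get?_foldl_pvIns_of_contains (L : List String) (m : PySem.Dict String Int) (x : String)
    (h : m.contains x = true) : (L.foldl pvIns m).get? x = m.get? x := by
  induction L generalizing m with
  | nil => rfl
  | cons w L ih =>
      simp only [List.foldl_cons]
      rw [ih _ (contains_pvIns_of_contains m w x h), get?_pvIns_of_contains m w x h]

theorem contains_foldl_pvIns_of_contains (L : List String) (m : PySem.Dict String Int) (x : String)
    (h : m.contains x = true) : (L.foldl pvIns m).contains x = true := by
  induction L generalizing m with
  | nil => exact h
  | cons w L ih => exact ih _ (contains_pvIns_of_contains m w x h)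

theorem contains_foldl_pvIns_of_mem (L : List String) (m : PySem.Dict String Int) (x : String)
    (h : x ∈ L) : (L.foldl pvIns m).contains x = true := by
  induction L generalizing m with
  | nil => cases h
  | cons w L ih =>
      simp only [List.foldl_cons]
      rcases List.mem_cons.mp h with h1 | h1
      · subst h1
        apply contains_foldl_pvIns_of_contains
        unfold pvIns
        split_ifs with hc
        · exact hc
        · exact PySem.Dict.contains_insert_self _ _ _
      · exact ih _ h1

-- A's inner word loop, on cleaned words, in terms of pvIns and lookups in the line-final map
theorem innerW (cs : List String) (elem : List Int) (m : PySem.Dict String Int) :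
    cs.foldl pvStepW (elem, (m.size : Int), m) =
      (elem ++ cs.map (fun w => (cs.foldl pvIns m).getD w 0),
        ((cs.foldl pvIns m).size : Int), cs.foldl pvIns m) := by
  induction cs generalizing elem m with
  | nil => simp
  | cons w cs ih =>
      simp only [List.foldl_cons, List.map_cons]
      by_cases hc : m.contains w = true
      · have hins : pvIns m w = m := by unfold pvIns; simp [hc]
        have hstep : pvStepW (elem, (m.size : Int), m) w = (elem ++ [m.getD w 0], (m.size : Int), m) := by
          simp [pvStepW, hc]
        rw [hstep, hins, ih]
        have hv : m.getD w 0 = (cs.foldl pvIns m).getD w 0 := by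
          rw [PySem.Dict.getD_eq_get?_getD, PySem.Dict.getD_eq_get?_getD,
            get?_foldl_pvIns_of_contains cs m w hc]
        rw [hv]; simp
      · have hc' : m.contains w = false := by simpa using hc
        have hins : pvIns m w = m.insert w (m.size : Int) := by unfold pvIns; simp [hc']
        have hsz : ((m.insert w (m.size : Int)).size : Int) = (m.size : Int) + 1 := by
          rw [PySem.Dict.size_insert]; simp [hc']
        have hstep : pvStepW (elem, (m.size : Int), m) w =
            (elem ++ [(m.size : Int)], (m.size : Int) + 1, m.insert w (m.size : Int)) := by
          simp [pvStepW, hc', PySem.Dict.getD_insert_self]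
        rw [hstep, ← hsz, ih, hins]
        have hcw : (m.insert w (m.size : Int)).contains w = true :=
          PySem.Dict.contains_insert_self _ _ _
        have hv : ((cs.foldl pvIns (m.insert w (m.size : Int))).getD w 0) = (m.size : Int) := by
          rw [PySem.Dict.getD_eq_get?_getD, get?_foldl_pvIns_of_contains _ _ w hcw,
            PySem.Dict.get?_insert_self]; rfl
        rw [hv]; simp

theorem get?_foldl_lines_of_contains (K : List (List String)) (m : PySem.Dict String Int) (x : String)
    (h : m.contains x = true) :
    (K.foldl (fun m line => line.foldl pvIns m) m).get? x = m.get? x := by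
  induction K generalizing m with
  | nil => rfl
  | cons cs K ih =>
      simp only [List.foldl_cons]
      rw [ih _ (contains_foldl_pvIns_of_contains cs m x h),
        get?_foldl_pvIns_of_contains cs m x h]

theorem getD_stable (L : List String) (K : List (List String)) (m : PySem.Dict String Int)
    (x : String) (h : x ∈ L) :
    (((L.foldl pvIns m)).getD x 0) =
      ((K.foldl (fun m line => line.foldl pvIns m) (L.foldl pvIns m)).getD x 0) := by
  rw [PySem.Dict.getD_eq_get?_getD, PySem.Dict.getD_eq_get?_getD,
    get?_foldl_lines_of_contains K _ x (contains_foldl_pvIns_of_mem L m x h)]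

-- A's outer loop over cleaned kept lines; state = (counter, obs, map), counter = map size
def pvStepLineC (st : Int × List (List Int) × PySem.Dict String Int) (cs : List String) :
    Int × List (List Int) × PySem.Dict String Int :=
  let r := cs.foldl pvStepW ([], st.1, st.2.2)
  (r.2.1, st.2.1 ++ [r.1], r.2.2)

theorem outer (K : List (List String)) (obs : List (List Int)) (m : PySem.Dict String Int) :
    K.foldl pvStepLineC ((m.size : Int), obs, m) =
      (((K.foldl (fun m line => line.foldl pvIns m) m).size : Int),
        obs ++ K.map (fun cs => cs.map (fun w =>
          (K.foldl (fun m line => line.foldl pvIns m) m).getD w 0)),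
        K.foldl (fun m line => line.foldl pvIns m) m) := by
  induction K generalizing obs m with
  | nil => simp
  | cons cs K ih =>
      simp only [List.foldl_cons, List.map_cons]
      have hstep : pvStepLineC ((m.size : Int), obs, m) cs =
          (((cs.foldl pvIns m).size : Int),
            obs ++ [cs.map (fun w => (cs.foldl pvIns m).getD w 0)], cs.foldl pvIns m) := by
        simp [pvStepLineC, innerW]
      rw [hstep, ih]
      have helem : cs.map (fun w => (cs.foldl pvIns m).getD w 0) =
          cs.map (fun w => (K.foldl (fun m line => line.foldl pvIns m) (cs.foldl pvIns m)).getD w 0) :=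
        List.map_congr_left (fun w hw => getD_stable cs K m w hw)
      rw [helem]; simp

-- A's raw line fold = pvStepLineC over the cleaned, length≠2-filtered lines
theorem foldl_lines_eq (L : List (List String)) (st : Int × List (List Int) × PySem.Dict String Int) :
    L.foldl pvStepLineA st =
      ((L.filter (fun l => l.length != 2)).map (fun l => l.map pvClean)).foldl pvStepLineC st := by
  induction L generalizing st with
  | nil => rfl
  | cons l L ih =>
      simp only [List.foldl_cons, List.filter_cons]
      by_cases h2 : l.length = 2
      · have : pvStepLineA st l = st := by simp [pvStepLineA, h2]
        rw [this, ih]; simp [h2]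
      · have hA : pvStepLineA st l = pvStepLineC st (l.map pvClean) := by
          simp only [pvStepLineA, pvStepLineC, if_neg h2]
          rw [List.foldl_map]
          rfl
        rw [hA, ih]
        simp [h2]

theorem kept_eq (text : String) :
    (((((PySem.Str.split? text "\n").getD []).map PySem.Str.split₀).filter
        (fun l => !l.isEmpty)).filter (fun l => l.length != 2)).map (fun l => l.map pvClean)
      = pvKept text := by
  unfold pvKept
  rw [List.filter_filter]
  congr 1
  apply List.filter_congr
  intro a _
  exact Bool.and_comm _ _

-- ---- A's final map: items are the first-occurrence words paired with their ranks ----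

theorem fo_map_fst (s : List String) (ks : List String) (i : Int) :
    (pvFo ks i s).map (·.1) = pvNw ks s := by
  induction s generalizing ks i with
  | nil => rfl
  | cons w t ih =>
      simp only [pvFo, pvNw]
      split_ifs with h
      · exact ih ks (i + 1)
      · simp [ih (ks ++ [w]) (i + 1)]

theorem itemsA (s : List String) (m : PySem.Dict String Int) :
    (s.foldl pvIns m).items =
      m.items ++ (PySem.List.enumerate (pvNw m.keys s) (m.size : Int)).map (fun p => (p.2, p.1)) := by
  induction s generalizing m with
  | nil => simp [pvNw, PySem.List.enumerate_nil]
  | cons w t ih =>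
      simp only [List.foldl_cons, pvNw]
      by_cases hc : m.contains w = true
      · have hmem : w ∈ m.keys := (PySem.Dict.contains_iff_mem_keys m w).mp hc
        have hins : pvIns m w = m := by unfold pvIns; simp [hc]
        rw [hins, if_pos hmem, ih]
      · have hc' : m.contains w = false := by simpa using hc
        have hmem : w ∉ m.keys := by
          intro h; exact absurd ((PySem.Dict.contains_iff_mem_keys m w).mpr h) hc
        have hins : pvIns m w = m.insert w (m.size : Int) := by unfold pvIns; simp [hc']
        rw [hins, if_neg hmem, ih]
        rw [PySem.Dict.items_insert_of_not_contains m _ hc',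
          PySem.Dict.keys_insert_of_not_contains m _ hc',
          PySem.Dict.size_insert, if_neg (by simp [hc']),
          PySem.List.enumerate_cons]
        push_cast
        simp

-- ---- B's first dict: lookups are the first-occurrence positions ----

-- last-write-wins characterisation of the reverse-scan fold
theorem get?_revfold (ps : List (Int × String)) (d : PySem.Dict String Int) (w : String) :
    ((ps.foldl (fun d p => d.insert p.2 p.1) d)).get? w =
      match ps.reverse.find? (fun p => p.2 == w) with
      | some p => some p.1
      | none => d.get? w := by
  induction ps generalizing d with
  | nil => simp
  | cons p ps ih =>
      simp only [List.foldl_cons, List.reverse_cons]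
      rw [ih, List.find?_append]
      cases hf : ps.reverse.find? (fun p => p.2 == w) with
      | some q => simp [Option.or]

      | none =>
          simp only [Option.or]
          by_cases hw : p.2 = w
          · subst hw; simp [PySem.Dict.get?_insert_self]
          · have : w ≠ p.2 := fun h => hw h.symm
            simp [hw, PySem.Dict.get?_insert_of_ne _ _ this]

theorem fo_fst_not_mem (s : List String) (ks : List String) (i : Int) (p : String × Int)
    (h : p ∈ pvFo ks i s) : p.1 ∉ ks := by
  induction s generalizing ks i with
  | nil => cases h
  | cons w t ih =>
      simp only [pvFo] at h
      split_ifs at h with hw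
      · exact ih ks (i + 1) h
      · rcases List.mem_cons.mp h with h1 | h1
        · subst h1; exact hw
        · intro hk
          exact (ih (ks ++ [w]) (i + 1) h1) (List.mem_append_left _ hk)

theorem fo_find (s : List String) (ks : List String) (i : Int) (p : String × Int)
    (h : p ∈ pvFo ks i s) :
    (PySem.List.enumerate s i).find? (fun q => q.2 == p.1) = some (p.2, p.1) := by
  induction s generalizing ks i with
  | nil => cases h
  | cons w t ih =>
      rw [PySem.List.enumerate_cons]
      simp only [pvFo] at h
      split_ifs at h with hw
      · have hne : w ≠ p.1 := by
          intro he; exact (fo_fst_not_mem t ks (i + 1) p h) (he ▸ hw)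
        rw [List.find?_cons_of_neg (by simpa using hne)]
        exact ih ks (i + 1) h
      · rcases List.mem_cons.mp h with h1 | h1
        · subst h1
          rw [List.find?_cons_of_pos (by simp)]
        · have hne : w ≠ p.1 := by
            intro he
            exact (fo_fst_not_mem t (ks ++ [w]) (i + 1) p h1)
              (List.mem_append_right _ (by simp [he]))
          rw [List.find?_cons_of_neg (by simpa using hne)]
          exact ih (ks ++ [w]) (i + 1) h1

theorem mem_nw (s : List String) (ks : List String) (w : String) :
    w ∈ pvNw ks s ↔ (w ∈ s ∧ w ∉ ks) := by
  induction s generalizing ks with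
  | nil => simp [pvNw]
  | cons v t ih =>
      simp only [pvNw]
      split_ifs with hv
      · rw [ih]
        constructor
        · rintro ⟨h1, h2⟩; exact ⟨List.mem_cons_of_mem _ h1, h2⟩
        · rintro ⟨h1, h2⟩
          rcases List.mem_cons.mp h1 with h3 | h3
          · exact absurd (h3 ▸ hv) h2
          · exact ⟨h3, h2⟩
      · constructor
        · intro h
          rcases List.mem_cons.mp h with h1 | h1
          · exact ⟨h1 ▸ List.mem_cons_self, h1 ▸ hv⟩
          · rcases (ih (ks ++ [v])).mp h1 with ⟨h2, h3⟩
            exact ⟨List.mem_cons_of_mem _ h2, fun hk => h3 (List.mem_append_left _ hk)⟩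
        · rintro ⟨h1, h2⟩
          rcases List.mem_cons.mp h1 with h3 | h3
          · exact h3 ▸ List.mem_cons_self
          · by_cases hw : w = v
            · exact hw ▸ List.mem_cons_self
            · exact List.mem_cons_of_mem _ ((ih (ks ++ [v])).mpr
                ⟨h3, fun hk => by
                  rcases List.mem_append.mp hk with h4 | h4
                  · exact h2 h4
                  · exact hw (by simpa using h4)⟩)

theorem nw_not_mem (s : List String) (ks : List String) (w : String)
    (h : w ∈ pvNw ks s) : w ∉ ks := ((mem_nw s ks w).mp h).2

theorem nodup_nw (s : List String) (ks : List String) : (pvNw ks s).Nodup := by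
  induction s generalizing ks with
  | nil => simp [pvNw]
  | cons v t ih =>
      simp only [pvNw]
      split_ifs with hv
      · exact ih ks
      · refine List.nodup_cons.mpr ⟨?_, ih (ks ++ [v])⟩
        intro hmem
        exact (nw_not_mem t (ks ++ [v]) v hmem) (List.mem_append_right _ (by simp))

theorem fo_snd_ge (s : List String) (ks : List String) (i : Int) (p : String × Int)
    (h : p ∈ pvFo ks i s) : i ≤ p.2 := by
  induction s generalizing ks i with
  | nil => cases h
  | cons w t ih =>
      simp only [pvFo] at h
      split_ifs at h with hw
      · have := ih ks (i + 1) h; omega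
      · rcases List.mem_cons.mp h with h1 | h1
        · subst h1; simp
        · have := ih (ks ++ [w]) (i + 1) h1; omega

theorem fo_pairwise (s : List String) (ks : List String) (i : Int) :
    (pvFo ks i s).Pairwise (fun a b => a.2 < b.2) := by
  induction s generalizing ks i with
  | nil => simp [pvFo]
  | cons w t ih =>
      simp only [pvFo]
      split_ifs with hw
      · exact ih ks (i + 1)
      · refine List.pairwise_cons.mpr ⟨?_, ih (ks ++ [w]) (i + 1)⟩
        intro p hp
        have := fo_snd_ge t (ks ++ [w]) (i + 1) p hp
        simpa using by omega

-- PySem.List.enumerate of a mapped list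
theorem enumerate_map {α β : Type} (f : α → β) (xs : List α) (s : Int) :
    PySem.List.enumerate (xs.map f) s = (PySem.List.enumerate xs s).map (fun p => (p.1, f p.2)) := by
  induction xs generalizing s with
  | nil => simp [PySem.List.enumerate_nil]
  | cons x xs ih => simp [PySem.List.enumerate_cons, ih]

-- the central fact: B's sorted-rank dict IS A's incremental dict
theorem dicts_eq (s : List String) :
    ((PySem.List.enumerate (PySem.List.sorted
        ((((PySem.List.enumerate s 0).reverse).foldl
            (fun d p => d.insert p.2 p.1) (PySem.Dict.empty : PySem.Dict String Int)).items)
        (fun p => p.2)) 0).foldl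
      (fun d q => d.insert q.2.1 q.1) (PySem.Dict.empty : PySem.Dict String Int))
    = s.foldl pvIns PySem.Dict.empty := by
  set first := (((PySem.List.enumerate s 0).reverse).foldl
      (fun d p => d.insert p.2 p.1) (PySem.Dict.empty : PySem.Dict String Int)) with hfirst
  -- first's lookups are the first-occurrence positions
  have hget : ∀ w : String, first.get? w =
      match (PySem.List.enumerate s 0).find? (fun p => p.2 == w) with
      | some p => some p.1
      | none => none := by
    intro w
    rw [hfirst, get?_revfold, List.reverse_reverse]
    cases h : (PySem.List.enumerate s 0).find? (fun p => p.2 == w) <;> simp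
  -- first's keys: nodup, membership = membership in s
  have hndk : first.keys.Nodup := by
    rw [hfirst]
    exact PySem.Dict.nodup_keys_foldl_insert_key ((PySem.List.enumerate s 0).reverse)
      (fun (p : Int × String) => p.2) (fun d p => p.1) PySem.Dict.empty
      PySem.Dict.nodup_keys_empty
  have hkeys : ∀ w : String, w ∈ first.keys ↔ w ∈ s := by
    intro w
    rw [hfirst, PySem.Dict.keys_foldl_insert_key ((PySem.List.enumerate s 0).reverse)
      (fun (p : Int × String) => p.2) (fun d p => p.1) PySem.Dict.empty]
    rw [PySem.Dict.keys_empty]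
    have : w ∈ (PySem.Set.update ([] : PySem.Set String)
        (((PySem.List.enumerate s 0).reverse).map (fun p => p.2))) ↔
        w ∈ ((PySem.List.enumerate s 0).reverse).map (fun p => p.2) := by
      rw [PySem.Set.mem_update]; simp
    rw [this, List.map_reverse, PySem.List.map_snd_enumerate]
    simp
  -- the consistency function
  have hg : ∀ p : String × Int, p ∈ pvFo [] 0 s → (p.1, first.getD p.1 0) = p := by
    intro p hp
    have := fo_find s [] 0 p hp
    rw [PySem.Dict.getD_eq_get?_getD, hget p.1, this]
    simp
  -- fo = nw mapped through the lookup
  have hfo : (pvNw [] s).map (fun w => (w, first.getD w 0)) = pvFo [] 0 s := by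
    rw [← fo_map_fst s [] 0, List.map_map]
    calc (pvFo [] 0 s).map ((fun w => (w, first.getD w 0)) ∘ (·.1))
        = (pvFo [] 0 s).map id := List.map_congr_left (fun p hp => hg p hp)
      _ = pvFo [] 0 s := List.map_id _
  -- first.items is a permutation of fo
  have hperm : (pvFo [] 0 s).Perm first.items := by
    rw [PySem.Dict.items_eq_map_keys first hndk 0, ← hfo]
    apply List.Perm.map
    rw [List.perm_ext_iff_of_nodup (nodup_nw s []) hndk]
    intro w
    rw [mem_nw, hkeys]
    simp
  -- so the sort names fo exactly
  have hsort : PySem.List.sorted first.items (fun p => p.2) = pvFo [] 0 s :=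
    PySem.List.sorted_eq_of_perm_of_pairwise_lt _ _ _ hperm (fo_pairwise s [] 0)
  rw [hsort]
  -- build obs_map from fo: fresh distinct keys append in order
  apply PySem.Dict.ext
  have hfresh : ∀ q ∈ PySem.List.enumerate (pvFo [] 0 s) 0,
      (PySem.Dict.empty : PySem.Dict String Int).contains q.2.1 = false := by
    intro q _; exact PySem.Dict.contains_empty _
  have hmapnd : ((PySem.List.enumerate (pvFo [] 0 s) 0).map (fun q => q.2.1)).Nodup := by
    have h1 : (PySem.List.enumerate (pvFo [] 0 s) 0).map (fun q => q.2.1)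
        = ((PySem.List.enumerate (pvFo [] 0 s) 0).map (fun q => q.2)).map (fun p => p.1) := by
      rw [List.map_map]; rfl
    rw [h1, PySem.List.map_snd_enumerate, fo_map_fst]
    exact nodup_nw s []
  have hins := PySem.Dict.items_foldl_insert_fresh (PySem.List.enumerate (pvFo [] 0 s) 0)
    (fun (q : Int × (String × Int)) => q.2.1) (fun q => q.1) PySem.Dict.empty hfresh hmapnd
  rw [hins]
  rw [itemsA s PySem.Dict.empty]
  have hsz : ((PySem.Dict.empty : PySem.Dict String Int).size : Int) = 0 := by
    simp [PySem.Dict.size_empty]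
  rw [PySem.Dict.keys_empty, hsz]
  have hempty : (PySem.Dict.empty : PySem.Dict String Int).items = [] := rfl
  simp only [hempty, List.nil_append]
  rw [← hfo, enumerate_map, List.map_map]
  rfl

-- nested line-by-line fold = fold over the flattened stream
theorem nested_eq_flatten (K : List (List String)) (m : PySem.Dict String Int) :
    K.foldl (fun m line => line.foldl pvIns m) m = K.flatten.foldl pvIns m :=
  (List.foldl_flatten).symm

-- ===== VERDICT (by name: the statement is the Claim_ definition above) =====
theorem parse_observations_spec : Claim_equal_parse_observations := by
  intro text _
  show parse_observations text = parse_observations_alt text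
  unfold parse_observations parse_observations_alt
  dsimp only
  rw [foldl_lines_eq, kept_eq]
  have h0 : ((0 : Int), ([] : List (List Int)), (PySem.Dict.empty : PySem.Dict String Int)) =
      (((PySem.Dict.empty : PySem.Dict String Int).size : Int), ([] : List (List Int)),
        (PySem.Dict.empty : PySem.Dict String Int)) := by
    simp [PySem.Dict.size_empty]
  rw [h0, outer]
  rw [nested_eq_flatten, ← dicts_eq (pvKept text).flatten]
  simp
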